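-- pv_equiv track=rewrite | github.com/SelianU/codetree-TILs | 250323/3개의 선 2/three-lines-2.py | choose_1_2_and_delete
-- ===== SOURCE A (Python) =====
-- def choose_1_2_and_delete(p_x, p_y, points):
--     for i_idx, first in enumerate(p_x):
--         for j_idx, second in enumerate(p_y):
--             for k_idx, third in enumerate(p_y):
--                 # p에 있는 거 제외하고 남은거 묶어서 리스트로 만들어
--                 p = [point for point in points if point[0] != first and point[1] != second and point[1] != third]
--                 if not p:
--                     continue
--                 else:
--                     return True
--     return False
-- ===== SOURCE B (Python) =====
-- def choose_1_2_and_delete(p_x, p_y, points):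
--     # A triple (x, s, t) leaves a survivor iff some point p has p[0] != x and
--     # p[1] != s and p[1] != t; since s and t range over the same list (t = s is
--     # allowed), this holds for some triple iff some point has a non-matching
--     # coordinate on each axis independently.
--     xs = set(p_x)
--     ys = set(p_y)
--     if not xs or not ys:
--         return False
--     for point in points:
--         if (len(xs) > 1 or point[0] not in xs) and (len(ys) > 1 or point[1] not in ys):
--             return True
--     return False
-- ===== Notes on version B (the rewrite author's own statement) =====
-- stated objective: faster
-- what changed: Replaces the triple nested loop over p_x x p_y x p_y with per-point survivor filtering by a single pass over points using the deduplicated coordinate sets: a point survives some triple iff it differs from some p_x value and from some p_y value, checked in O(1) per point.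
-- outside the precondition, e.g. on choose_1_2_and_delete([1], [1], [(1,)]): A returns False, B returns False
import Mathlib
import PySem

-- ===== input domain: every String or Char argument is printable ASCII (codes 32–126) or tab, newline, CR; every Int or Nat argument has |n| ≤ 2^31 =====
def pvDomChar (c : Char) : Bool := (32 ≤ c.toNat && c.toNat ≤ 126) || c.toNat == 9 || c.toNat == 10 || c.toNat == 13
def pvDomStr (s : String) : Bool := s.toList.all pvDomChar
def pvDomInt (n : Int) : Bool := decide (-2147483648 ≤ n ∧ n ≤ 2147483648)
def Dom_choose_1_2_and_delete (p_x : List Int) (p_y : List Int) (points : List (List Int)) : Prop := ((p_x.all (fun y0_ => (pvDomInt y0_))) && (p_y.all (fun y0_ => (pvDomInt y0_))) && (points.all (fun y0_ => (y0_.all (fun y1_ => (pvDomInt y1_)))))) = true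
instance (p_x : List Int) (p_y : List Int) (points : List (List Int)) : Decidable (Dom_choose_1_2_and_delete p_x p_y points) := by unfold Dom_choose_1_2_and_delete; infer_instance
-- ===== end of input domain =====

-- B replaces A's triple nested loop over p_x × p_y × p_y (each building a filtered copy of
-- points) by one pass over points against the two deduplicated coordinate sets (objective: faster).

-- ===== PORT A =====
-- point[0] / point[1] via pyGet?; the .getD 0 default is never reached under Pre_ (rows have length ≥ 2).
def choose_1_2_and_delete (p_x : List Int) (p_y : List Int) (points : List (List Int)) : Bool :=
  p_x.any (fun first =>
    p_y.any (fun second =>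
      p_y.any (fun third =>
        !((points.filter (fun pt =>
            ((PySem.List.pyGet? pt 0).getD 0 != first) &&
            ((PySem.List.pyGet? pt 1).getD 0 != second) &&
            ((PySem.List.pyGet? pt 1).getD 0 != third))).isEmpty))))

-- ===== PORT B =====
def choose_1_2_and_delete_alt (p_x : List Int) (p_y : List Int) (points : List (List Int)) : Bool :=
  let xs : PySem.Set Int := PySem.Set.ofList p_x
  let ys : PySem.Set Int := PySem.Set.ofList p_y
  if xs.isEmpty || ys.isEmpty then false
  else
    points.any (fun pt =>
      (decide (1 < xs.length) || !(xs.contains ((PySem.List.pyGet? pt 0).getD 0))) &&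
      (decide (1 < ys.length) || !(ys.contains ((PySem.List.pyGet? pt 1).getD 0))))

-- ===== PRECONDITION & SPEC =====
-- Pre_ excludes point rows with fewer than 2 entries when both coordinate lists are nonempty:
-- there the Python programs index point[0]/point[1] and may raise IndexError (whether they do
-- depends on incidental equalities, so this exclusion is slightly conservative: on a few such
-- inputs, e.g. ([1],[1],[[1]]), both A and B still return False).
def Pre_choose_1_2_and_delete (p_x : List Int) (p_y : List Int) (points : List (List Int)) : Prop :=
  p_x ≠ [] → p_y ≠ [] → ∀ pt ∈ points, 2 ≤ pt.length
instance (p_x : List Int) (p_y : List Int) (points : List (List Int)) : Decidable (Pre_choose_1_2_and_delete p_x p_y points) := by unfold Pre_choose_1_2_and_delete; infer_instance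

def pvWitness_choose_1_2_and_delete : List Int × List Int × List (List Int) := ([0], [0, 1], [[0, 0], [2, 3]])

def Spec_choose_1_2_and_delete (p_x : List Int) (p_y : List Int) (points : List (List Int)) (out : Bool) : Prop := out = choose_1_2_and_delete_alt p_x p_y points
instance (p_x : List Int) (p_y : List Int) (points : List (List Int)) (out : Bool) : Decidable (Spec_choose_1_2_and_delete p_x p_y points out) := by unfold Spec_choose_1_2_and_delete; infer_instance

-- ===== CLAIM (what is proved, stated in full; the proofs are below) =====
def Claim_equal_choose_1_2_and_delete : Prop := ∀ (p_x : List Int) (p_y : List Int) (points : List (List Int)), Dom_choose_1_2_and_delete p_x p_y points → Pre_choose_1_2_and_delete p_x p_y points → Spec_choose_1_2_and_delete p_x p_y points (choose_1_2_and_delete p_x p_y points)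

-- ===== LEMMAS AND PROOFS =====

theorem pv_ofList_ne_nil {l : List Int} (h : l ≠ []) : PySem.Set.ofList l ≠ [] := by
  rcases l with _ | ⟨a, t⟩
  · exact absurd rfl h
  · intro hc
    have : a ∈ PySem.Set.ofList (a :: t) := by
      rw [PySem.Set.mem_ofList]; exact List.mem_cons_self
    rw [hc] at this
    exact List.not_mem_nil this

-- "differs from some element of l" ⇔ "l has ≥ 2 distinct values, or v is not a value of l"
theorem pv_crit (l : List Int) (hl : l ≠ []) (v : Int) :
    (1 < (PySem.Set.ofList l).length ∨ (PySem.Set.ofList l).contains v = false) ↔ ∃ a ∈ l, ¬ v = a := by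
  have hc : ∀ x : Int, (PySem.Set.ofList l).contains x = false ↔ x ∉ PySem.Set.ofList l := by
    intro x; simp
  have hnd : (PySem.Set.ofList l).Nodup := PySem.Set.nodup_ofList l
  have hne : PySem.Set.ofList l ≠ [] := pv_ofList_ne_nil hl
  rw [hc]
  constructor
  · rintro (hlen | hnot)
    · rcases hd : PySem.Set.ofList l with _ | ⟨a, _ | ⟨b, r⟩⟩
      · simp [hd] at hlen
      · simp [hd] at hlen
      · have hab : a ≠ b := by
          rw [hd] at hnd
          simp [List.nodup_cons] at hnd
          exact hnd.1.1
        have hal : a ∈ l := by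
          rw [← PySem.Set.mem_ofList (xs := l), hd]; simp
        have hbl : b ∈ l := by
          rw [← PySem.Set.mem_ofList (xs := l), hd]; simp
        by_cases hva : v = a
        · exact ⟨b, hbl, by rw [hva]; exact hab⟩
        · exact ⟨a, hal, hva⟩
    · rcases l with _ | ⟨a, t⟩
      · exact absurd rfl hl
      · refine ⟨a, List.mem_cons_self, fun hva => ?_⟩
        apply hnot
        rw [PySem.Set.mem_ofList, hva]
        exact List.mem_cons_self
  · rintro ⟨a, ha, hva⟩
    by_cases h1 : 1 < (PySem.Set.ofList l).length
    · exact Or.inl h1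
    · right
      intro hv
      rcases hd : PySem.Set.ofList l with _ | ⟨u, _ | ⟨w, r⟩⟩
      · exact hne hd
      · have hau : a = u := by
          have : a ∈ PySem.Set.ofList l := by rw [PySem.Set.mem_ofList]; exact ha
          rw [hd] at this; simpa using this
        have hvu : v = u := by rw [hd] at hv; simpa using hv
        exact hva (by rw [hvu, hau])
      · rw [hd] at h1; simp [List.length_cons] at h1

theorem pv_not_isEmpty_filter {α : Type} (p : α → Bool) (l : List α) :
    (!(l.filter p).isEmpty) = l.any p := by
  induction l with
  | nil => rfl
  | cons a t ih =>
      by_cases h : p a <;> simp [List.any_cons, h, ih]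

theorem pv_main (p_x p_y : List Int) (points : List (List Int)) :
    choose_1_2_and_delete p_x p_y points = choose_1_2_and_delete_alt p_x p_y points := by
  by_cases hx : p_x = []
  · subst hx
    simp [choose_1_2_and_delete, choose_1_2_and_delete_alt, PySem.Set.ofList]
  · by_cases hy : p_y = []
    · subst hy
      simp [choose_1_2_and_delete, choose_1_2_and_delete_alt, PySem.Set.ofList]
    · have hxs := pv_ofList_ne_nil hx
      have hys := pv_ofList_ne_nil hy
      rw [Bool.eq_iff_iff]
      unfold choose_1_2_and_delete choose_1_2_and_delete_alt
      simp only [pv_not_isEmpty_filter]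
      rw [if_neg (by simp [List.isEmpty_iff, hxs, hys])]
      simp only [List.any_eq_true, Bool.and_eq_true, bne_iff_ne, ne_eq, Bool.or_eq_true,
        decide_eq_true_eq, Bool.not_eq_true']
      constructor
      · rintro ⟨f, hf, s, hs, t, ht, pt, hpt, ⟨h0, h1⟩, h2⟩
        exact ⟨pt, hpt, (pv_crit p_x hx _).mpr ⟨f, hf, h0⟩, (pv_crit p_y hy _).mpr ⟨s, hs, h1⟩⟩
      · rintro ⟨pt, hpt, hcx, hcy⟩
        obtain ⟨f, hf, h0⟩ := (pv_crit p_x hx _).mp hcx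
        obtain ⟨s, hs, h1⟩ := (pv_crit p_y hy _).mp hcy
        exact ⟨f, hf, s, hs, s, hs, pt, hpt, ⟨h0, h1⟩, h1⟩

-- ===== VERDICT (by name: the statement is the Claim_ definition above) =====
theorem choose_1_2_and_delete_spec : Claim_equal_choose_1_2_and_delete := by
  intro p_x p_y points _ _
  unfold Spec_choose_1_2_and_delete
  exact pv_main p_x p_y points
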